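-- pv_equiv track=rewrite | github.com/yujung412/PPP2025 | 과제10/longest_rain.py | get_rain_event
-- ===== SOURCE A (Python) =====
-- def get_rain_event(rainfalls):  # 최장연속강우일수 계산
--     events = []
--     c_days = 0
--     for rain in rainfalls:
--         if rain > 0:
--             c_days += 1
--         else:
--             if c_days > 0:
--                 events.append(c_days)
--             c_days = 0
--     if c_days > 0:
--         events.append(c_days)
--     return events
-- ===== SOURCE B (Python) =====
-- def get_rain_event(rainfalls):
--     # Span-scan: find each maximal run of positive values and record its length.
--     events = []
--     n = len(rainfalls)
--     i = 0
--     while i < n: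
--         if rainfalls[i] > 0:
--             j = i
--             while j < n and rainfalls[j] > 0:
--                 j += 1
--             events.append(j - i)
--             i = j
--         else:
--             i += 1
--     return events
-- ===== Notes on version B (the rewrite author's own statement) =====
-- stated objective: alternative
-- what changed: Replaces A's single pass carrying a cross-branch counter (flushed on zeros and at the end) with a span-scan that locates each maximal positive run and emits its length directly, with no pending-counter state.
import Mathlib
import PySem

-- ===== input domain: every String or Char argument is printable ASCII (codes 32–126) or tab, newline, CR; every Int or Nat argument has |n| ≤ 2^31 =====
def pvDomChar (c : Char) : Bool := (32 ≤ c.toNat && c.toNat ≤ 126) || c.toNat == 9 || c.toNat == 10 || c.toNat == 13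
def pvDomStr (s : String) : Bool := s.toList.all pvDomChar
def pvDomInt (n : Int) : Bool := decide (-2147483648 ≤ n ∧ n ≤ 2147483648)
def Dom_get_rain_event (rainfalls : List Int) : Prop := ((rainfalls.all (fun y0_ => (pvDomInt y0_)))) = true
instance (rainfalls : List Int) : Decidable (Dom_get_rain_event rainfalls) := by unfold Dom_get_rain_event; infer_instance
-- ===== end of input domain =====

-- B replaces A's cross-branch pending counter with a span-scan emitting each maximal positive run's length (alternative decomposition, same cost).


-- ===== PORT A =====
-- A's loop: carries (events, c_days); zeros flush the counter, a final flush after the loop.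
def get_rain_event_go (xs : List Int) (events : List Int) (c_days : Int) : List Int :=
  match xs with
  | [] => if c_days > 0 then events ++ [c_days] else events
  | rain :: rest =>
      if rain > 0 then get_rain_event_go rest events (c_days + 1)
      else get_rain_event_go rest (if c_days > 0 then events ++ [c_days] else events) 0

def get_rain_event (rainfalls : List Int) : List Int :=
  get_rain_event_go rainfalls [] 0

-- ===== PORT B =====
-- inner while of Source B: length of the leading positive run
def runLen : List Int → Int
  | [] => 0
  | r :: rs => if r > 0 then 1 + runLen rs else 0

-- outer while of Source B: at a positive element emit the run length and jump past the run, else step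
def get_rain_event_alt_go : List Int → List Int
  | [] => []
  | r :: rs =>
      if r > 0 then (1 + runLen rs) :: get_rain_event_alt_go (rs.dropWhile (fun x => decide (x > 0)))
      else get_rain_event_alt_go rs
termination_by xs => xs.length
decreasing_by
  · simpa using Nat.lt_succ_of_le (List.length_dropWhile_le _ _)
  · simp

def get_rain_event_alt (rainfalls : List Int) : List Int :=
  get_rain_event_alt_go rainfalls

-- ===== PRECONDITION & SPEC =====
def Spec_get_rain_event (rainfalls : List Int) (out : List Int) : Prop := out = get_rain_event_alt rainfalls
instance (rainfalls : List Int) (out : List Int) : Decidable (Spec_get_rain_event rainfalls out) := by unfold Spec_get_rain_event; infer_instance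

-- ===== CLAIM (what is proved, stated in full; the proofs are below) =====
def Claim_equal_get_rain_event : Prop := ∀ (rainfalls : List Int), Dom_get_rain_event rainfalls → Spec_get_rain_event rainfalls (get_rain_event rainfalls)

-- ===== LEMMAS AND PROOFS =====

-- A's loop with pending counter c, events stripped off
def pendRuns (xs : List Int) (c : Int) : List Int :=
  match xs with
  | [] => if c > 0 then [c] else []
  | rain :: rest =>
      if rain > 0 then pendRuns rest (c + 1)
      else (if c > 0 then [c] else []) ++ pendRuns rest 0

theorem go_eq_pendRuns (xs : List Int) (events : List Int) (c : Int) :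
    get_rain_event_go xs events c = events ++ pendRuns xs c := by
  induction xs generalizing events c with
  | nil => simp [get_rain_event_go, pendRuns]; split <;> simp
  | cons r rs ih =>
      simp only [get_rain_event_go, pendRuns]
      split
      · exact ih _ _
      · rw [ih]; split <;> simp

theorem pendRuns_eq_alt (xs : List Int) :
    (∀ c : Int, c > 0 →
      pendRuns xs c = (c + runLen xs) :: get_rain_event_alt_go (xs.dropWhile (fun x => decide (x > 0))))
    ∧ pendRuns xs 0 = get_rain_event_alt_go xs := by
  induction xs with
  | nil =>
      constructor
      · intro c hc; simp [pendRuns, runLen, get_rain_event_alt_go, hc]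
      · simp [pendRuns, get_rain_event_alt_go]
  | cons r rs ih =>
      constructor
      · intro c hc
        by_cases hr : r > 0
        · rw [pendRuns, if_pos hr, (ih.1 (c + 1) (by omega))]
          simp [runLen, hr, List.dropWhile]
          ring_nf
        · rw [pendRuns, if_neg hr]
          simp [hc, runLen, hr, List.dropWhile, get_rain_event_alt_go, ih.2]
      · by_cases hr : r > 0
        · rw [pendRuns, if_pos hr, show (0:Int)+1 = 1 from rfl, ih.1 1 (by omega)]
          simp [get_rain_event_alt_go, hr]
        · rw [pendRuns, if_neg hr]
          simp [get_rain_event_alt_go, hr, ih.2]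

-- ===== VERDICT (by name: the statement is the Claim_ definition above) =====
theorem get_rain_event_spec : Claim_equal_get_rain_event := by
  intro xs _
  unfold Spec_get_rain_event get_rain_event get_rain_event_alt
  rw [go_eq_pendRuns, (pendRuns_eq_alt xs).2, List.nil_append]
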